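-- pv_equiv track=rewrite | github.com/Raneemoqaily7/codewars | codewars/code.py | mcount
-- ===== SOURCE A (Python) =====
-- def mcount(arr):
--   n = []                  #To store count of each elements
--   for x in arr:
--       count = 0
--       for i in range(len(arr)):
--           if x == arr[i]:
--               count+=1
--       n.append(count)
--   a = max(n)
--   if a ==1:
--        a=0
--                #largest in counts list
--    #element,frequency
--   return   len(arr) - a
-- ===== SOURCE B (Python) =====
-- def mcount(arr):
--     # Sort a copy, then one pass over the sorted list keeps the current run
--     # length of equal neighbours and the best run seen so far.
--     best = 0
--     run = 0
--     prev = None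
--     for x in sorted(arr):
--         run = run + 1 if prev == x else 1
--         if run > best:
--             best = run
--         prev = x
--     if best == 1:
--         best = 0
--     return len(arr) - best
-- ===== Notes on version B (the rewrite author's own statement) =====
-- stated objective: faster
-- what changed: Sorts a copy of the list and finds the maximum multiplicity as the longest run of equal neighbours in one linear pass, instead of re-scanning the whole list for every element.
import Mathlib
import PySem

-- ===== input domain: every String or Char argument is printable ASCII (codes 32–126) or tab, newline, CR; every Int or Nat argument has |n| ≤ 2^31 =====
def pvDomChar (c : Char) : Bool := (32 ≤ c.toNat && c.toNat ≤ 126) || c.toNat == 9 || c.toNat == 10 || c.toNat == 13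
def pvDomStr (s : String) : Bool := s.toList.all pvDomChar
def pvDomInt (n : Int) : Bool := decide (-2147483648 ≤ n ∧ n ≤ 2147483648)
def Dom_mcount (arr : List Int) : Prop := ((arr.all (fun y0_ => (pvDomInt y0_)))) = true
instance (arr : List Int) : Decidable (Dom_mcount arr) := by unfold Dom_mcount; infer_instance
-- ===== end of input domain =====

-- B sorts a copy and takes the maximum multiplicity as the longest run of equal neighbours in one pass; measured/intended objective: faster.


-- ===== PORT A =====
-- literal port of A: for each x, an inner scan over range(len(arr)) counts arr[i] == x
def mcount (arr : List Int) : Int :=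
  let n : List Int := arr.foldl (fun acc x =>
    acc ++ [(PySem.List.pyRange 0 (arr.length : Int) 1).foldl
      (fun c i => if (PySem.List.pyGetD arr i 0) = x then c + 1 else c) 0]) []
  let a : Int := (PySem.List.max? n (fun v => v)).getD 0   -- max(n); Pre_ excludes the empty-list ValueError
  let a : Int := if a = 1 then 0 else a
  (arr.length : Int) - a

-- ===== PORT B =====
-- one pass over sorted(arr): run = current run of equal neighbours, best = longest run so far
def mcount_alt (arr : List Int) : Int :=
  let st := (PySem.List.sorted arr (fun v => v) false).foldl
    (fun (st : Int × Int × Option Int) x =>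
      let best := st.1
      let run := st.2.1
      let prev := st.2.2
      let run := if prev = some x then run + 1 else 1
      let best := if run > best then run else best
      (best, run, some x))
    (0, 0, none)
  let best := if st.1 = 1 then 0 else st.1
  (arr.length : Int) - best

-- ===== PRECONDITION & SPEC =====
-- Pre_ excludes only the empty list, on which A raises ValueError (max of an empty sequence)
def Pre_mcount (arr : List Int) : Prop := arr ≠ []
instance (arr : List Int) : Decidable (Pre_mcount arr) := by unfold Pre_mcount; infer_instance
def pvWitness_mcount : List Int := [1, 2, 2, 3]
def Spec_mcount (arr : List Int) (out : Int) : Prop := out = mcount_alt arr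
instance (arr : List Int) (out : Int) : Decidable (Spec_mcount arr out) := by unfold Spec_mcount; infer_instance

-- ===== CLAIM (what is proved, stated in full; the proofs are below) =====
def Claim_equal_mcount : Prop := ∀ (arr : List Int), Dom_mcount arr → Pre_mcount arr → Spec_mcount arr (mcount arr)

-- ===== LEMMAS AND PROOFS =====

-- Mx t = max of the multiset of per-element counts of t (0 for the empty list)
def Mx (t : List Int) : Int :=
  (PySem.List.max? (t.map (fun x => (t.count x : Int))) (fun v => v)).getD 0

theorem Mx_nil : Mx [] = 0 := rfl

-- appending one element: the count of x grows by one, all other counts are unchanged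
theorem count_snoc_self (t : List Int) (x : Int) :
    ((t ++ [x]).count x : Int) = (t.count x : Int) + 1 := by
  simp [List.count_append]

theorem count_snoc_ne (t : List Int) (x y : Int) (h : y ≠ x) :
    (t ++ [x]).count y = t.count y := by
  simp [List.count_append, Ne.symm h]

theorem Mx_snoc (t : List Int) (x : Int) :
    Mx (t ++ [x]) = max (Mx t) ((t.count x : Int) + 1) := by
  obtain ⟨m, hm⟩ : ∃ m, PySem.List.max? ((t ++ [x]).map (fun y => (((t ++ [x]).count y : Int)))) (fun v => v) = some m := by
    cases hc : PySem.List.max? ((t ++ [x]).map (fun y => (((t ++ [x]).count y : Int)))) (fun v => v) with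
    | none => exact absurd ((PySem.List.max?_eq_none_iff _ _).mp hc) (by simp)
    | some m => exact ⟨m, rfl⟩
  have hmem := PySem.List.max?_mem hm
  have hmax := PySem.List.max?_isMax hm
  have lo1 : (t.count x : Int) + 1 ≤ m := by
    have := hmax (((t ++ [x]).count x : Int)) (List.mem_map.mpr ⟨x, by simp, rfl⟩)
    rw [count_snoc_self] at this
    exact this
  have lo2 : Mx t ≤ m := by
    cases ht : t with
    | nil =>
      have : (List.count x [] : Int) ≥ 0 := by positivity
      simp only [Mx_nil]
      omega
    | cons a t' =>
      rw [← ht]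
      have htne : t ≠ [] := by simp [ht]
      obtain ⟨m₀, hm₀⟩ : ∃ m₀, PySem.List.max? (t.map (fun y => ((t.count y : Int)))) (fun v => v) = some m₀ := by
        cases hc : PySem.List.max? (t.map (fun y => ((t.count y : Int)))) (fun v => v) with
        | none => exact absurd ((PySem.List.max?_eq_none_iff _ _).mp hc) (by simpa [List.map_eq_nil_iff] using htne)
        | some m₀ => exact ⟨m₀, rfl⟩
      have hMt : Mx t = m₀ := by unfold Mx; rw [hm₀]; rfl
      obtain ⟨y, hy, hym⟩ := List.mem_map.mp (PySem.List.max?_mem hm₀)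
      rw [hMt, ← hym]
      by_cases hyx : y = x
      · subst hyx
        have : (t.count y : Int) ≤ (t.count y : Int) + 1 := by omega
        omega
      · have hmem' : ((t ++ [x]).count y : Int) ∈ (t ++ [x]).map (fun z => (((t ++ [x]).count z : Int))) :=
          List.mem_map.mpr ⟨y, by simp [hy], rfl⟩
        have := hmax _ hmem'
        rw [count_snoc_ne t x y hyx] at this
        exact this
  have up : m ≤ max (Mx t) ((t.count x : Int) + 1) := by
    obtain ⟨y, hy, hym⟩ := List.mem_map.mp hmem
    by_cases hyx : y = x
    · subst hyx
      rw [count_snoc_self] at hym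
      omega
    · have hyt : y ∈ t := by
        rcases List.mem_append.mp hy with h | h
        · exact h
        · exact absurd (List.mem_singleton.mp h) hyx
      have htne : t ≠ [] := List.ne_nil_of_mem hyt
      obtain ⟨m₀, hm₀⟩ : ∃ m₀, PySem.List.max? (t.map (fun z => ((t.count z : Int)))) (fun v => v) = some m₀ := by
        cases hc : PySem.List.max? (t.map (fun z => ((t.count z : Int)))) (fun v => v) with
        | none => exact absurd ((PySem.List.max?_eq_none_iff _ _).mp hc) (by simpa [List.map_eq_nil_iff] using htne)
        | some m₀ => exact ⟨m₀, rfl⟩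
      have hMt : Mx t = m₀ := by unfold Mx; rw [hm₀]; rfl
      have : m ≤ Mx t := by
        rw [hMt, ← hym, count_snoc_ne t x y hyx]
        exact PySem.List.max?_isMax hm₀ _ (List.mem_map.mpr ⟨y, hyt, rfl⟩)
      omega
  have hMx : Mx (t ++ [x]) = m := by unfold Mx; rw [hm]; rfl
  rw [hMx]
  exact le_antisymm up (max_le lo2 lo1)

-- x does not occur in a sorted list whose last element is p ≠ x while every element ≤ x
theorem not_mem_of_sorted_snoc (t : List Int) (x p : Int) (hp : t.getLast? = some p)
    (hne : p ≠ x) (hle : ∀ a ∈ t, a ≤ x) (hs : t.Pairwise (fun a b => a ≤ b)) : x ∉ t := by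
  intro hx
  obtain ⟨t', rfl⟩ := List.getLast?_eq_some_iff.mp hp
  have hpx : p ≤ x := hle p (by simp)
  rw [List.pairwise_append] at hs
  rcases List.mem_append.mp hx with hx' | hx'
  · have : x ≤ p := hs.2.2 x hx' p (by simp)
    exact hne (le_antisymm hpx this)
  · exact hne ((List.mem_singleton.mp hx')).symm

-- the loop invariant of B's single pass over the sorted list
theorem fold_run (s : List Int) (hs : s.Pairwise (fun a b => a ≤ b)) :
    s.foldl
      (fun (st : Int × Int × Option Int) x =>
        let best := st.1
        let run := st.2.1
        let prev := st.2.2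
        let run := if prev = some x then run + 1 else 1
        let best := if run > best then run else best
        (best, run, some x))
      (0, 0, none)
    = (Mx s, (match s.getLast? with | none => 0 | some p => (s.count p : Int)), s.getLast?) := by
  induction s using List.reverseRecOn with
  | nil => rfl
  | append_singleton t x ih =>
    have hsp := List.pairwise_append.mp hs
    have hle : ∀ a ∈ t, a ≤ x := fun a ha => hsp.2.2 a ha x (by simp)
    rw [List.foldl_append, ih hsp.1]
    simp only [List.foldl_cons, List.foldl_nil]
    cases hgl : t.getLast? with
    | none =>
      have ht : t = [] := List.getLast?_eq_none_iff.mp hgl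
      subst ht
      have h1 : Mx [x] = 1 := by simpa [Mx_nil] using Mx_snoc [] x
      simp [h1, Mx_nil]
    | some p =>
      have key := Mx_snoc t x
      by_cases hpx : p = x
      · subst hpx
        simp [key]
        split <;> omega
      · have hxt : x ∉ t := not_mem_of_sorted_snoc t x p hgl hpx hle hsp.1
        have hcx : t.count x = 0 := List.count_eq_zero.mpr hxt
        rw [hcx] at key
        simp [key, hcx, hpx]
        split <;> omega

-- A's inner scan over range(len(arr)) is the count of x in arr
theorem inner_count (arr : List Int) (x : Int) :
    (PySem.List.pyRange 0 (arr.length : Int) 1).foldl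
      (fun c i => if (PySem.List.pyGetD arr i 0) = x then c + 1 else c) 0 = (arr.count x : Int) := by
  have h1 := List.foldl_map (f := fun i => PySem.List.pyGetD arr i 0)
      (g := fun (c v : Int) => if v = x then c + 1 else c)
      (l := PySem.List.pyRange 0 (arr.length : Int) 1) (init := (0 : Int))
  have hm : List.map (fun i => PySem.List.pyGetD arr i 0) (PySem.List.pyRange 0 (arr.length : Int) 1) = arr :=
    PySem.List.map_pyGetD_pyRange_zero arr 0
  rw [hm] at h1
  rw [← h1, PySem.List.foldl_ite_add_one]
  simp only [zero_add, List.count, Nat.cast_inj]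
  apply List.countP_congr; intro a _; simp

theorem mcount_eval (arr : List Int) :
    mcount arr = (arr.length : Int) - (if Mx arr = 1 then 0 else Mx arr) := by
  unfold mcount Mx
  dsimp only
  rw [PySem.List.foldl_append_singleton_eq_map, List.nil_append, funext (inner_count arr)]

-- two nonempty lists with the same members have the same Python max
theorem max_eq_of_mem_iff (l₁ l₂ : List Int) (h : ∀ x, x ∈ l₁ ↔ x ∈ l₂)
    (h₁ : l₁ ≠ []) (h₂ : l₂ ≠ []) :
    PySem.List.max? l₁ (fun v => v) = PySem.List.max? l₂ (fun v => v) := by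
  obtain ⟨m₁, hm₁⟩ : ∃ m, PySem.List.max? l₁ (fun v => v) = some m := by
    cases hc : PySem.List.max? l₁ (fun v => v) with
    | none => exact absurd ((PySem.List.max?_eq_none_iff _ _).mp hc) h₁
    | some m => exact ⟨m, rfl⟩
  obtain ⟨m₂, hm₂⟩ : ∃ m, PySem.List.max? l₂ (fun v => v) = some m := by
    cases hc : PySem.List.max? l₂ (fun v => v) with
    | none => exact absurd ((PySem.List.max?_eq_none_iff _ _).mp hc) h₂
    | some m => exact ⟨m, rfl⟩
  rw [hm₁, hm₂]
  have le1 : m₁ ≤ m₂ := PySem.List.max?_isMax hm₂ m₁ ((h m₁).mp (PySem.List.max?_mem hm₁))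
  have le2 : m₂ ≤ m₁ := PySem.List.max?_isMax hm₁ m₂ ((h m₂).mpr (PySem.List.max?_mem hm₂))
  exact congrArg some (le_antisymm le1 le2)

theorem Mx_sorted (arr : List Int) (hne : arr ≠ []) :
    Mx (PySem.List.sorted arr (fun v => v) false) = Mx arr := by
  have hperm : (PySem.List.sorted arr (fun v => v) false).Perm arr :=
    PySem.List.sorted_perm arr (fun v => v) false
  unfold Mx
  rw [max_eq_of_mem_iff]
  · intro y
    simp only [List.mem_map]
    constructor
    · rintro ⟨z, hz, rfl⟩
      exact ⟨z, hperm.mem_iff.mp hz, by rw [hperm.count_eq]⟩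
    · rintro ⟨z, hz, rfl⟩
      exact ⟨z, hperm.mem_iff.mpr hz, by rw [hperm.count_eq]⟩
  · simpa [List.map_eq_nil_iff, PySem.List.sorted_eq_nil_iff] using hne
  · simpa [List.map_eq_nil_iff] using hne

-- ===== VERDICT (by name: the statement is the Claim_ definition above) =====
theorem mcount_spec : Claim_equal_mcount := by
  intro arr _ hpre
  unfold Spec_mcount
  rw [mcount_eval]
  unfold mcount_alt
  rw [fold_run _ (PySem.List.sorted_pairwise arr (fun v => v))]
  dsimp only
  rw [Mx_sorted arr hpre]
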